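-- pv_equiv track=rewrite | github.com/amber881124/chat | chat.py | convert
-- ===== SOURCE A (Python) =====
-- def convert(chat):
--     new = []
--     person = None # 先不給值(但還是要先宣告這個變數，以免出錯)
--     for line in chat:
--         if line == 'Allen':
--             person = 'Allen'
--             continue
--         elif line == 'Tom':
--             person = 'Tom'
--             continue
--         if person: # 如果person有值
--             new.append([person, line])
--     return new
-- ===== SOURCE B (Python) =====
-- def _segments(chat):
--     # Partition the chat into (speaker, lines) segments; lines before the
--     # first speaker label are discarded.
--     segs = []
--     i, n = 0, len(chat)
--     while i < n:
--         head = chat[i]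
--         i += 1
--         if head in ('Allen', 'Tom'):
--             body = []
--             while i < n and chat[i] not in ('Allen', 'Tom'):
--                 body.append(chat[i])
--                 i += 1
--             segs.append((head, body))
--     return segs
--
-- def convert(chat):
--     return [[sp, line] for sp, body in _segments(list(chat)) for line in body]
-- ===== Notes on version B (the rewrite author's own statement) =====
-- stated objective: alternative
-- what changed: Replaces A's single stateful pass (carrying the current speaker and appending per line) by a two-phase decomposition: first partition the chat into (speaker, lines) segments keyed by the labels, then flatten each segment into [speaker, line] pairs.
import Mathlib
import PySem

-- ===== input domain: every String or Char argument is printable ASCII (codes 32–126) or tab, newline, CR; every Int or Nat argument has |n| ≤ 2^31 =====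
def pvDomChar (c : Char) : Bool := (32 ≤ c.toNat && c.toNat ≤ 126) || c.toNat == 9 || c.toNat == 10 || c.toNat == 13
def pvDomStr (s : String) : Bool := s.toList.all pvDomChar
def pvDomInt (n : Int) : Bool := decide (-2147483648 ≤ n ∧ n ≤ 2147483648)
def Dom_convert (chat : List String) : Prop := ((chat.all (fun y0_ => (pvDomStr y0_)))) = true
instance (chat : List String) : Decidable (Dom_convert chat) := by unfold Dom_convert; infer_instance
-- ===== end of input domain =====

-- B replaces A's single stateful pass by a partition-into-segments phase followed by a flatten phase (alternative decomposition, same cost).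


-- ===== PORT A =====
def convert (chat : List String) : List (List String) :=
  (chat.foldl
    (fun (st : List (List String) × Option String) line =>
      if line = "Allen" then (st.1, some "Allen")
      else if line = "Tom" then (st.1, some "Tom")
      else
        match st.2 with
        | some p => (st.1 ++ [[p, line]], st.2)
        | none => st)
    ([], none)).1

-- ===== PORT B =====
def pvIsLabel (s : String) : Bool := s == "Allen" || s == "Tom"

def pvSegments : List String → List (String × List String)
  | [] => []
  | head :: rest =>
    if pvIsLabel head then
      (head, rest.takeWhile (fun x => !pvIsLabel x))
        :: pvSegments (rest.dropWhile (fun x => !pvIsLabel x))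
    else pvSegments rest
termination_by chat => chat.length
decreasing_by
  · simpa using Nat.lt_succ_of_le (List.length_dropWhile_le _ _)
  · simp

def convert_alt (chat : List String) : List (List String) :=
  (pvSegments chat).flatMap (fun seg => seg.2.map (fun line => [seg.1, line]))

-- ===== PRECONDITION & SPEC =====
def Spec_convert (chat : List String) (out : List (List String)) : Prop := out = convert_alt chat
instance (chat : List String) (out : List (List String)) : Decidable (Spec_convert chat out) := by unfold Spec_convert; infer_instance

-- ===== CLAIM (what is proved, stated in full; the proofs are below) =====
def Claim_equal_convert : Prop := ∀ (chat : List String), Dom_convert chat → Spec_convert chat (convert chat)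

-- ===== LEMMAS AND PROOFS =====

-- Relational form of A's fold
def convA : Option String → List String → List (List String)
  | _, [] => []
  | p, l :: rest =>
    if l = "Allen" then convA (some "Allen") rest
    else if l = "Tom" then convA (some "Tom") rest
    else
      match p with
      | some sp => [sp, l] :: convA p rest
      | none => convA p rest

theorem convert_foldl (chat : List String) (acc : List (List String)) (p : Option String) :
    (chat.foldl
      (fun (st : List (List String) × Option String) line =>
        if line = "Allen" then (st.1, some "Allen")
        else if line = "Tom" then (st.1, some "Tom")
        else
          match st.2 with
          | some q => (st.1 ++ [[q, line]], st.2)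
          | none => st)
      (acc, p)).1 = acc ++ convA p chat := by
  induction chat generalizing acc p with
  | nil => simp [convA]
  | cons l rest ih =>
    simp only [List.foldl_cons, convA]
    split_ifs with h1 h2
    · simp [ih]
    · simp [ih]
    · cases p with
      | none => simp [ih]
      | some sp => simp [ih]

theorem convA_some (sp : String) (chat : List String) :
    convA (some sp) chat =
      ((chat.takeWhile (fun x => !pvIsLabel x)).map (fun l => [sp, l]))
        ++ convA none (chat.dropWhile (fun x => !pvIsLabel x)) := by
  induction chat with
  | nil => simp [convA]
  | cons l rest ih =>
    by_cases h1 : l = "Allen"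
    · simp [convA, h1, pvIsLabel, List.takeWhile, List.dropWhile]
    · by_cases h2 : l = "Tom"
      · simp [convA, h2, pvIsLabel, List.takeWhile, List.dropWhile]
      · have hl : pvIsLabel l = false := by
          simp [pvIsLabel, h1, h2]
        simp [convA, h1, h2, List.takeWhile, List.dropWhile, hl, ih]

theorem convA_none_eq (chat : List String) :
    convA none chat =
      (pvSegments chat).flatMap (fun seg => seg.2.map (fun line => [seg.1, line])) := by
  induction chat using pvSegments.induct with
  | case1 => simp [convA, pvSegments]
  | case2 head rest hlab ih =>
    have : head = "Allen" ∨ head = "Tom" := by simpa [pvIsLabel] using hlab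
    rcases this with h | h <;> subst h <;>
      simp [convA, pvSegments, hlab, convA_some, ih]
  | case3 head rest hlab ih =>
    have h1 : ¬ head = "Allen" := by rintro rfl; simp [pvIsLabel] at hlab
    have h2 : ¬ head = "Tom" := by rintro rfl; simp [pvIsLabel] at hlab
    simp [convA, h1, h2, pvSegments, hlab, ih]

-- ===== VERDICT (by name: the statement is the Claim_ definition above) =====
theorem convert_spec : Claim_equal_convert := by
  intro chat _
  unfold Spec_convert convert convert_alt
  rw [convert_foldl chat [] none, convA_none_eq]
  simp
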